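-- pv_equiv track=rewrite | github.com/DeadCoder-N/root | security-toolkit/tool-12-dns-analyzer/backend/app.py | add_fix_prompts
-- ===== SOURCE A (Python) =====
-- def add_fix_prompts(vulnerabilities):
--     for vuln in vulnerabilities:
--         vuln_type = vuln.get('type', '')
--         if 'DNSSEC' in vuln_type:
--             vuln['fix_prompt'] = "Enable DNSSEC. Add DS records to parent zone. Sign zone with DNSSEC keys. Test with dnssec-analyzer.verisignlabs.com"
--         elif 'SPF' in vuln_type:
--             vuln['fix_prompt'] = "Add SPF record: v=spf1 include:_spf.google.com ~all. Test with mxtoolbox.com/spf.aspx"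
--         elif 'DMARC' in vuln_type:
--             vuln['fix_prompt'] = "Add DMARC record: _dmarc.domain.com TXT v=DMARC1; p=quarantine; rua=mailto:admin@domain.com"
--         elif 'Zone Transfer' in vuln_type:
--             vuln['fix_prompt'] = "Disable zone transfers. Allow only trusted secondary DNS servers. Configure allow-transfer in BIND."
--         else:
--             vuln['fix_prompt'] = f"Review and fix {vuln_type}. Check DNS security best practices."
--     return vulnerabilities
-- ===== SOURCE B (Python) =====
-- _PROMPTS = {
--     'DNSSEC': "Enable DNSSEC. Add DS records to parent zone. Sign zone with DNSSEC keys. Test with dnssec-analyzer.verisignlabs.com",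
--     'SPF': "Add SPF record: v=spf1 include:_spf.google.com ~all. Test with mxtoolbox.com/spf.aspx",
--     'DMARC': "Add DMARC record: _dmarc.domain.com TXT v=DMARC1; p=quarantine; rua=mailto:admin@domain.com",
--     'Zone Transfer': "Disable zone transfers. Allow only trusted secondary DNS servers. Configure allow-transfer in BIND.",
-- }
--
-- def add_fix_prompts(vulnerabilities):
--     # Pass 0: give every record the default prompt.
--     for vuln in vulnerabilities:
--         vuln['fix_prompt'] = f"Review and fix {vuln.get('type', '')}. Check DNS security best practices."
--     # One pass per keyword, in REVERSE priority order: a later pass overwrites an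
--     # earlier one, so the highest-priority matching keyword ends up winning.
--     for key in ('Zone Transfer', 'DMARC', 'SPF', 'DNSSEC'):
--         prompt = _PROMPTS[key]
--         for vuln in vulnerabilities:
--             if key in vuln.get('type', ''):
--                 vuln['fix_prompt'] = prompt
--     return vulnerabilities
-- ===== Notes on version B (the rewrite author's own statement) =====
-- stated objective: alternative
-- what changed: Instead of a per-record first-match if/elif chain, B makes staged passes over the whole list: one pass writes the default prompt everywhere, then one overwrite pass per keyword in reverse priority order, so the highest-priority matching keyword's prompt is the last one written.
import Mathlib
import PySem

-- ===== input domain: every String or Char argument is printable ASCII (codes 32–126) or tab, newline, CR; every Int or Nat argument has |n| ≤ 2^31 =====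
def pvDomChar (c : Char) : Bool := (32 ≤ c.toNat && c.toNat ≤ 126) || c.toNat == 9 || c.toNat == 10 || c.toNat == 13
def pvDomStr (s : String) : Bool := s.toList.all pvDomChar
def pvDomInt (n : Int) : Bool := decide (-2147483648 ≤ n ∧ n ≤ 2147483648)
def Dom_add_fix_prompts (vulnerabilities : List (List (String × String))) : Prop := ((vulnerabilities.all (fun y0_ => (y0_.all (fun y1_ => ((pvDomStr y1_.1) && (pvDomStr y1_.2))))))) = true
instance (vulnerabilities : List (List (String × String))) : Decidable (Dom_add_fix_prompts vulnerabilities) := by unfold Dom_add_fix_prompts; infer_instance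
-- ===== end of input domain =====

-- B replaces A's per-record first-match if/elif chain by staged whole-list passes: one pass
-- writes the default prompt everywhere, then one overwrite pass per keyword in reverse
-- priority order, so the highest-priority match is written last (objective: alternative).
-- A mutates each dict in place and returns the same list; B performs the same mutations;
-- the equivalence proved here is about the returned value.

-- ===== PORT A =====
def add_fix_prompts (vulnerabilities : List (List (String × String))) : List (List (String × String)) :=
  vulnerabilities.map (fun vuln =>
    let vuln_type := PySem.Dict.getD ⟨vuln⟩ "type" ""
    if PySem.Str.isIn "DNSSEC" vuln_type then
      (PySem.Dict.insert ⟨vuln⟩ "fix_prompt" "Enable DNSSEC. Add DS records to parent zone. Sign zone with DNSSEC keys. Test with dnssec-analyzer.verisignlabs.com").items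
    else if PySem.Str.isIn "SPF" vuln_type then
      (PySem.Dict.insert ⟨vuln⟩ "fix_prompt" "Add SPF record: v=spf1 include:_spf.google.com ~all. Test with mxtoolbox.com/spf.aspx").items
    else if PySem.Str.isIn "DMARC" vuln_type then
      (PySem.Dict.insert ⟨vuln⟩ "fix_prompt" "Add DMARC record: _dmarc.domain.com TXT v=DMARC1; p=quarantine; rua=mailto:admin@domain.com").items
    else if PySem.Str.isIn "Zone Transfer" vuln_type then
      (PySem.Dict.insert ⟨vuln⟩ "fix_prompt" "Disable zone transfers. Allow only trusted secondary DNS servers. Configure allow-transfer in BIND.").items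
    else
      (PySem.Dict.insert ⟨vuln⟩ "fix_prompt" ("Review and fix " ++ vuln_type ++ ". Check DNS security best practices.")).items)

-- ===== PORT B =====
-- the _PROMPTS dict of Source B
def pvPrompts : PySem.Dict String String :=
  PySem.Dict.ofList
    [("DNSSEC", "Enable DNSSEC. Add DS records to parent zone. Sign zone with DNSSEC keys. Test with dnssec-analyzer.verisignlabs.com"),
     ("SPF", "Add SPF record: v=spf1 include:_spf.google.com ~all. Test with mxtoolbox.com/spf.aspx"),
     ("DMARC", "Add DMARC record: _dmarc.domain.com TXT v=DMARC1; p=quarantine; rua=mailto:admin@domain.com"),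
     ("Zone Transfer", "Disable zone transfers. Allow only trusted secondary DNS servers. Configure allow-transfer in BIND.")]

-- body of Source B's pass-0 loop: write the default prompt
def pvDefault (vuln : List (String × String)) : List (String × String) :=
  (PySem.Dict.insert ⟨vuln⟩ "fix_prompt"
    ("Review and fix " ++ PySem.Dict.getD ⟨vuln⟩ "type" "" ++ ". Check DNS security best practices.")).items

-- body of Source B's inner overwrite loop for one keyword
def pvOverwrite (key prompt : String) (vuln : List (String × String)) : List (String × String) :=
  if PySem.Str.isIn key (PySem.Dict.getD ⟨vuln⟩ "type" "") then
    (PySem.Dict.insert ⟨vuln⟩ "fix_prompt" prompt).items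
  else vuln

def add_fix_prompts_alt (vulnerabilities : List (List (String × String))) : List (List (String × String)) :=
  -- pass 0: default prompt everywhere
  -- then one overwrite pass per keyword, reverse priority order
  (["Zone Transfer", "DMARC", "SPF", "DNSSEC"] : List String).foldl
    (fun acc key => acc.map (pvOverwrite key (PySem.Dict.getD pvPrompts key "")))
    (vulnerabilities.map pvDefault)

-- ===== PRECONDITION & SPEC =====
def Spec_add_fix_prompts (vulnerabilities : List (List (String × String))) (out : List (List (String × String))) : Prop := out = add_fix_prompts_alt vulnerabilities
instance (vulnerabilities : List (List (String × String))) (out : List (List (String × String))) : Decidable (Spec_add_fix_prompts vulnerabilities out) := by unfold Spec_add_fix_prompts; infer_instance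

-- ===== CLAIM =====
def Claim_equal_add_fix_prompts : Prop := ∀ (vulnerabilities : List (List (String × String))), Dom_add_fix_prompts vulnerabilities → Spec_add_fix_prompts vulnerabilities (add_fix_prompts vulnerabilities)

-- ===== LEMMAS AND PROOFS =====

-- reading "type" is unaffected by inserting "fix_prompt"
theorem pvGetD_type_insert_fix (d : PySem.Dict String String) (v : String) :
    PySem.Dict.getD (PySem.Dict.insert d "fix_prompt" v) "type" "" = PySem.Dict.getD d "type" "" := by
  simp [PySem.Dict.getD_insert]

-- an overwrite pass applied to a record that already carries a "fix_prompt" entry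
theorem pvOverwrite_insert (key p v : String) (vuln : List (String × String)) :
    pvOverwrite key p ((PySem.Dict.insert ⟨vuln⟩ "fix_prompt" v).items)
    = (PySem.Dict.insert ⟨vuln⟩ "fix_prompt"
        (if PySem.Str.isIn key (PySem.Dict.getD ⟨vuln⟩ "type" "") then p else v)).items := by
  show (if PySem.Str.isIn key (PySem.Dict.getD (PySem.Dict.insert ⟨vuln⟩ "fix_prompt" v) "type" "") then
       ((PySem.Dict.insert ⟨vuln⟩ "fix_prompt" v).insert "fix_prompt" p).items
     else (PySem.Dict.insert ⟨vuln⟩ "fix_prompt" v).items) = _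
  rw [pvGetD_type_insert_fix, PySem.Dict.insert_insert_self]
  split_ifs <;> rfl

-- the four staged passes on one record equal A's if/elif chain on that record
theorem pvElem (vuln : List (String × String)) :
    pvOverwrite "DNSSEC" (PySem.Dict.getD pvPrompts "DNSSEC" "")
      (pvOverwrite "SPF" (PySem.Dict.getD pvPrompts "SPF" "")
        (pvOverwrite "DMARC" (PySem.Dict.getD pvPrompts "DMARC" "")
          (pvOverwrite "Zone Transfer" (PySem.Dict.getD pvPrompts "Zone Transfer" "")
            (pvDefault vuln))))
    = (if PySem.Str.isIn "DNSSEC" (PySem.Dict.getD ⟨vuln⟩ "type" "") then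
        (PySem.Dict.insert ⟨vuln⟩ "fix_prompt" "Enable DNSSEC. Add DS records to parent zone. Sign zone with DNSSEC keys. Test with dnssec-analyzer.verisignlabs.com").items
      else if PySem.Str.isIn "SPF" (PySem.Dict.getD ⟨vuln⟩ "type" "") then
        (PySem.Dict.insert ⟨vuln⟩ "fix_prompt" "Add SPF record: v=spf1 include:_spf.google.com ~all. Test with mxtoolbox.com/spf.aspx").items
      else if PySem.Str.isIn "DMARC" (PySem.Dict.getD ⟨vuln⟩ "type" "") then
        (PySem.Dict.insert ⟨vuln⟩ "fix_prompt" "Add DMARC record: _dmarc.domain.com TXT v=DMARC1; p=quarantine; rua=mailto:admin@domain.com").items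
      else if PySem.Str.isIn "Zone Transfer" (PySem.Dict.getD ⟨vuln⟩ "type" "") then
        (PySem.Dict.insert ⟨vuln⟩ "fix_prompt" "Disable zone transfers. Allow only trusted secondary DNS servers. Configure allow-transfer in BIND.").items
      else
        (PySem.Dict.insert ⟨vuln⟩ "fix_prompt" ("Review and fix " ++ PySem.Dict.getD ⟨vuln⟩ "type" "" ++ ". Check DNS security best practices.")).items) := by
  rw [show pvDefault vuln = (PySem.Dict.insert ⟨vuln⟩ "fix_prompt"
        ("Review and fix " ++ PySem.Dict.getD ⟨vuln⟩ "type" "" ++ ". Check DNS security best practices.")).items from rfl,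
    pvOverwrite_insert, pvOverwrite_insert, pvOverwrite_insert, pvOverwrite_insert,
    show PySem.Dict.getD pvPrompts "DNSSEC" "" = "Enable DNSSEC. Add DS records to parent zone. Sign zone with DNSSEC keys. Test with dnssec-analyzer.verisignlabs.com" by decide,
    show PySem.Dict.getD pvPrompts "SPF" "" = "Add SPF record: v=spf1 include:_spf.google.com ~all. Test with mxtoolbox.com/spf.aspx" by decide,
    show PySem.Dict.getD pvPrompts "DMARC" "" = "Add DMARC record: _dmarc.domain.com TXT v=DMARC1; p=quarantine; rua=mailto:admin@domain.com" by decide,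
    show PySem.Dict.getD pvPrompts "Zone Transfer" "" = "Disable zone transfers. Allow only trusted secondary DNS servers. Configure allow-transfer in BIND." by decide]
  split_ifs <;> rfl

-- ===== VERDICT =====
theorem add_fix_prompts_spec : Claim_equal_add_fix_prompts := by
  intro vs _
  unfold Spec_add_fix_prompts add_fix_prompts add_fix_prompts_alt
  simp only [List.foldl_cons, List.foldl_nil, List.map_map]
  apply List.map_congr_left
  intro vuln hv
  dsimp only [Function.comp_apply]
  exact (pvElem vuln).symm
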